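-- pv_equiv track=rewrite | github.com/mysticalg/AI-File-Namer | src/ai_file_namer.py | parse_ollama_model_names
-- ===== SOURCE A (Python) =====
-- from typing import Any, Callable, Dict, Iterable, List, Optional, Sequence, Tuple
--
-- def parse_ollama_model_names(payload: Dict[str, object]) -> List[str]:
--     """Extract sorted unique model names from Ollama `/api/tags` payload."""
--     models = payload.get("models", [])
--     if not isinstance(models, list):
--         return []
--
--     canonical_by_lower: Dict[str, str] = {}
--     for model in models:
--         if not isinstance(model, dict):
--             continue
--         raw_name = model.get("name")
--         if not isinstance(raw_name, str) or not raw_name.strip():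
--             continue
--
--         cleaned_name = raw_name.strip()
--         lower_name = cleaned_name.lower()
--         if lower_name not in canonical_by_lower:
--             canonical_by_lower[lower_name] = cleaned_name
--
--     return [canonical_by_lower[key] for key in sorted(canonical_by_lower)]
-- ===== SOURCE B (Python) =====
-- def parse_ollama_model_names(payload):
--     """Extract sorted unique model names: filter+strip, stable-sort by lowercase, adjacent dedup."""
--     models = payload.get("models", [])
--     if not isinstance(models, list):
--         return []
--     names = []
--     for model in models:
--         if not isinstance(model, dict):
--             continue
--         raw_name = model.get("name")
--         if isinstance(raw_name, str) and raw_name.strip():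
--             names.append(raw_name.strip())
--     names.sort(key=str.lower)
--     result = []
--     prev = None
--     for name in names:
--         low = name.lower()
--         if low != prev:
--             result.append(name)
--             prev = low
--     return result
-- ===== Notes on version B (the rewrite author's own statement) =====
-- stated objective: simpler
-- what changed: Replaces A's lowercase-keyed dict (build it, sort its keys, look each key back up) by a single filtered list that is stable-sorted by lowercase and then deduplicated in one pass by comparing each element's lowercase with the previously kept one.
import Mathlib
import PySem

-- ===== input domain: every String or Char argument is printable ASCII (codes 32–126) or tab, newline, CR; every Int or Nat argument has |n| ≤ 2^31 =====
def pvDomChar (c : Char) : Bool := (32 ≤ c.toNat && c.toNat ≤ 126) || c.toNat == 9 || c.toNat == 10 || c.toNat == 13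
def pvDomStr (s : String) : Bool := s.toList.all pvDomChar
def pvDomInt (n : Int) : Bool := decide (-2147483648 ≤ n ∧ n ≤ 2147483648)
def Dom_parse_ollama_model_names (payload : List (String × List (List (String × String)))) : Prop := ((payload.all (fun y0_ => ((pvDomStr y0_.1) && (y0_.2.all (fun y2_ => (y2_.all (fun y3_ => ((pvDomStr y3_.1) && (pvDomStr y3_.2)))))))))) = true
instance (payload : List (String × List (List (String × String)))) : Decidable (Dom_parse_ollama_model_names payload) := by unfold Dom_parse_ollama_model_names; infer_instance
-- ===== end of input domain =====

-- B replaces A's lowercase-keyed dict (build it, sort its keys, look each key back up) by a single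
-- filtered list that is stable-sorted by lowercase and then deduplicated by comparing each
-- element's lowercase with the previously kept one (objective: simpler).

-- ===== PORT A =====
-- 'isinstance(models, list)' / 'isinstance(model, dict)' / 'isinstance(raw_name, str)' are
-- guaranteed by the Lean type, so those guards cannot fire; 'model.get("name")' missing ↔ none.
-- 'canonical_by_lower[key]' is ported as getD with "": every sorted key comes from the dict
-- itself, so the default is never taken (KeyError impossible).
def parse_ollama_model_names (payload : List (String × List (List (String × String)))) : List String :=
  let models := (PySem.Dict.mk payload).getD "models" []
  let canonical_by_lower := models.foldl (fun (d : PySem.Dict String String) model =>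
      match (PySem.Dict.mk model).get? "name" with
      | none => d
      | some raw_name =>
        if PySem.Str.strip raw_name = "" then d
        else
          let cleaned_name := PySem.Str.strip raw_name
          let lower_name := PySem.Str.lower cleaned_name
          if d.contains lower_name then d
          else d.insert lower_name cleaned_name) PySem.Dict.empty
  (PySem.List.sorted canonical_by_lower.keys (fun k => k) false).map
    (fun key => canonical_by_lower.getD key "")

-- ===== PORT B =====
def parse_ollama_model_names_alt (payload : List (String × List (List (String × String)))) : List String :=
  let models := (PySem.Dict.mk payload).getD "models" []
  let names := models.foldl (fun (acc : List String) model =>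
      match (PySem.Dict.mk model).get? "name" with
      | none => acc
      | some raw_name =>
        if PySem.Str.strip raw_name = "" then acc
        else acc ++ [PySem.Str.strip raw_name]) []
  let sortedNames := PySem.List.sorted names (fun s => PySem.Str.lower s) false
  (sortedNames.foldl (fun (st : List String × Option String) name =>
      let low := PySem.Str.lower name
      if st.2 = some low then st else (st.1 ++ [name], some low)) ([], none)).1

-- ===== PRECONDITION & SPEC =====
def Spec_parse_ollama_model_names (payload : List (String × List (List (String × String)))) (out : List String) : Prop := out = parse_ollama_model_names_alt payload
instance (payload : List (String × List (List (String × String)))) (out : List String) : Decidable (Spec_parse_ollama_model_names payload out) := by unfold Spec_parse_ollama_model_names; infer_instance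

-- ===== CLAIM (what is proved, stated in full; the proofs are below) =====
def Claim_equal_parse_ollama_model_names : Prop := ∀ (payload : List (String × List (List (String × String)))), Dom_parse_ollama_model_names payload → Spec_parse_ollama_model_names payload (parse_ollama_model_names payload)

-- ===== LEMMAS AND PROOFS =====

-- the cleaned name a model contributes (none = skipped)
def pvNameOf (model : List (String × String)) : Option String :=
  match (PySem.Dict.mk model).get? "name" with
  | none => none
  | some raw => if PySem.Str.strip raw = "" then none else some (PySem.Str.strip raw)

-- A's dict-building step, over the contributed names
def pvDStep (d : PySem.Dict String String) (n : String) : PySem.Dict String String :=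
  if d.contains (PySem.Str.lower n) then d else d.insert (PySem.Str.lower n) n

-- adjacent dedup (by lowercase) as a recursion (B's accumulator loop computes it)
def pvDedup : Option String → List String → List String
  | _, [] => []
  | prev, n :: ns =>
    if prev = some (PySem.Str.lower n) then pvDedup prev ns
    else n :: pvDedup (some (PySem.Str.lower n)) ns

-- first occurrence of each lowercase class, in original order ('seen' = lowers already taken)
def pvFirst : List String → List String → List String
  | _, [] => []
  | seen, n :: ns =>
    if PySem.Str.lower n ∈ seen then pvFirst seen ns
    else n :: pvFirst (PySem.Str.lower n :: seen) ns

lemma pvNames_fold (models : List (List (String × String))) (acc : List String) :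
    models.foldl (fun (acc : List String) model =>
      match (PySem.Dict.mk model).get? "name" with
      | none => acc
      | some raw_name =>
        if PySem.Str.strip raw_name = "" then acc
        else acc ++ [PySem.Str.strip raw_name]) acc = acc ++ models.filterMap pvNameOf := by
  induction models generalizing acc with
  | nil => simp
  | cons m ms ih =>
    have hn : pvNameOf m = match (PySem.Dict.mk m).get? "name" with
      | none => none
      | some raw => if PySem.Str.strip raw = "" then none else some (PySem.Str.strip raw) := rfl
    rw [List.foldl_cons, List.filterMap_cons, hn]
    cases h : (PySem.Dict.mk m).get? "name" with
    | none => simp only; exact ih acc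
    | some raw =>
      by_cases hs : PySem.Str.strip raw = ""
      · simp only [if_pos hs]; exact ih acc
      · simp only [if_neg hs, ih]; simp

lemma pvDict_fold (models : List (List (String × String))) (d : PySem.Dict String String) :
    models.foldl (fun (d : PySem.Dict String String) model =>
      match (PySem.Dict.mk model).get? "name" with
      | none => d
      | some raw_name =>
        if PySem.Str.strip raw_name = "" then d
        else
          let cleaned_name := PySem.Str.strip raw_name
          let lower_name := PySem.Str.lower cleaned_name
          if d.contains lower_name then d
          else d.insert lower_name cleaned_name) d
    = (models.filterMap pvNameOf).foldl pvDStep d := by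
  induction models generalizing d with
  | nil => simp
  | cons m ms ih =>
    have hn : pvNameOf m = match (PySem.Dict.mk m).get? "name" with
      | none => none
      | some raw => if PySem.Str.strip raw = "" then none else some (PySem.Str.strip raw) := rfl
    rw [List.foldl_cons, List.filterMap_cons, hn]
    cases h : (PySem.Dict.mk m).get? "name" with
    | none => simp only; exact ih d
    | some raw =>
      by_cases hs : PySem.Str.strip raw = ""
      · simp only [if_pos hs]; exact ih d
      · simp only [if_neg hs, List.foldl_cons]; exact ih _

lemma pvDedup_fold (xs : List String) (acc : List String) (prev : Option String) :
    (xs.foldl (fun (st : List String × Option String) name =>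
      let low := PySem.Str.lower name
      if st.2 = some low then st else (st.1 ++ [name], some low)) (acc, prev)).1
    = acc ++ pvDedup prev xs := by
  induction xs generalizing acc prev with
  | nil => simp [pvDedup]
  | cons n ns ih =>
    simp only [List.foldl_cons, pvDedup]
    by_cases h : prev = some (PySem.Str.lower n) <;> simp [h, ih]

lemma pvFirst_congr (ns : List String) (s1 s2 : List String)
    (h : ∀ x, x ∈ s1 ↔ x ∈ s2) : pvFirst s1 ns = pvFirst s2 ns := by
  induction ns generalizing s1 s2 with
  | nil => rfl
  | cons n ns ih =>
    simp only [pvFirst]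
    by_cases h1 : PySem.Str.lower n ∈ s1
    · rw [if_pos h1, if_pos ((h _).1 h1), ih _ _ h]
    · rw [if_neg h1, if_neg (fun hx => h1 ((h _).2 hx))]
      congr 1
      apply ih
      intro x; simp [h x]

lemma pvDict_items (ns : List String) (d : PySem.Dict String String) :
    ((ns.foldl pvDStep d).items)
      = d.items ++ (pvFirst d.keys ns).map (fun n => (PySem.Str.lower n, n)) := by
  induction ns generalizing d with
  | nil => simp [pvFirst]
  | cons n ns ih =>
    simp only [List.foldl_cons, pvDStep, pvFirst]
    by_cases hc : d.contains (PySem.Str.lower n) = true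
    · rw [if_pos hc, if_pos ((PySem.Dict.contains_iff_mem_keys d _).mp hc), ih]
    · have hc' : d.contains (PySem.Str.lower n) = false := by
        exact Bool.not_eq_true _ ▸ eq_false_of_ne_true hc
      rw [if_neg hc, if_neg (fun hm => hc ((PySem.Dict.contains_iff_mem_keys d _).mpr hm)), ih]
      rw [PySem.Dict.items_insert_of_not_contains d n hc',
          PySem.Dict.keys_insert_of_not_contains d n hc',
          pvFirst_congr ns (d.keys ++ [PySem.Str.lower n]) (PySem.Str.lower n :: d.keys)
            (by intro x; simp; tauto)]
      simp

lemma pvFirst_nodup (ns : List String) (seen : List String) :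
    ((pvFirst seen ns).map PySem.Str.lower).Nodup
      ∧ ∀ x ∈ (pvFirst seen ns).map PySem.Str.lower, x ∉ seen := by
  induction ns generalizing seen with
  | nil => simp [pvFirst]
  | cons n ns ih =>
    simp only [pvFirst]
    by_cases h : PySem.Str.lower n ∈ seen
    · simpa [h] using ih seen
    · rw [if_neg h]
      obtain ⟨h1, h2⟩ := ih (PySem.Str.lower n :: seen)
      refine ⟨?_, ?_⟩
      · simp only [List.map_cons, List.nodup_cons]
        exact ⟨fun hm => (h2 _ hm) (by simp), h1⟩
      · intro x hx
        simp only [List.map_cons, List.mem_cons] at hx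
        rcases hx with rfl | hx
        · exact h
        · exact fun hs => (h2 _ hx) (by simp [hs])

lemma pvFirst_append (ns : List String) (seen : List String) (x : String) :
    pvFirst seen (ns ++ [x])
      = if PySem.Str.lower x ∈ seen ∨ PySem.Str.lower x ∈ ns.map PySem.Str.lower
        then pvFirst seen ns else pvFirst seen ns ++ [x] := by
  induction ns generalizing seen with
  | nil => by_cases h : PySem.Str.lower x ∈ seen <;> simp [pvFirst, h]
  | cons n ns ih =>
    simp only [List.cons_append, pvFirst, List.map_cons, List.mem_cons]
    by_cases h : PySem.Str.lower n ∈ seen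
    · rw [if_pos h, if_pos h, ih]
      by_cases hx : PySem.Str.lower x = PySem.Str.lower n
      · simp [hx, h]
      · simp [hx]
    · rw [if_neg h, if_neg h, ih]
      by_cases hx : PySem.Str.lower x ∈ PySem.Str.lower n :: seen ∨ PySem.Str.lower x ∈ ns.map PySem.Str.lower
      · rw [if_pos hx, if_pos (by simp only [List.mem_cons] at hx ⊢; tauto)]
      · rw [if_neg hx, if_neg (by simp only [List.mem_cons] at hx ⊢; tauto), List.cons_append]

-- inserting x whose lowercase equals prev, before a list whose lowers all exceed it, is dropped
lemma pvDedup_insert_dup_head (ys : List String) (x : String)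
    (hmem : PySem.Str.lower x ∉ ys.map PySem.Str.lower)
    (hle : ∀ z ∈ ys, PySem.Str.lower x ≤ PySem.Str.lower z) :
    pvDedup (some (PySem.Str.lower x))
        (PySem.List.insertBy (fun a b => decide (PySem.Str.lower a < PySem.Str.lower b)) x ys)
      = pvDedup (some (PySem.Str.lower x)) ys := by
  cases ys with
  | nil => simp [PySem.List.insertBy, pvDedup]
  | cons z zs =>
    have hne : PySem.Str.lower x ≠ PySem.Str.lower z := by
      intro he; exact hmem (by simp [he])
    have hlt : PySem.Str.lower x < PySem.Str.lower z :=
      lt_of_le_of_ne (hle z (by simp)) hne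
    simp [PySem.List.insertBy, hlt, pvDedup]

-- L1: inserting x whose lowercase already occurs in the sorted-by-lower list leaves dedup unchanged
lemma pvDedup_insert_dup (s : List String) (x : String) (prev : Option String)
    (hsort : (s.map PySem.Str.lower).Pairwise (· ≤ ·))
    (hmem : PySem.Str.lower x ∈ s.map PySem.Str.lower) :
    pvDedup prev (PySem.List.insertBy (fun a b => decide (PySem.Str.lower a < PySem.Str.lower b)) x s)
      = pvDedup prev s := by
  induction s generalizing prev with
  | nil => simp at hmem
  | cons y ys ih =>
    simp only [List.map_cons, List.pairwise_cons] at hsort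
    obtain ⟨hyle, hsort'⟩ := hsort
    have hnlt : ¬ PySem.Str.lower x < PySem.Str.lower y := by
      simp only [List.map_cons, List.mem_cons] at hmem
      rcases hmem with he | hm
      · simp [he]
      · intro hlt
        rcases List.mem_map.mp hm with ⟨z, hz, hze⟩
        exact absurd (hze ▸ hyle _ (List.mem_map_of_mem hz)) (not_le.mpr hlt)
    simp only [PySem.List.insertBy, decide_eq_true_eq, if_neg hnlt, pvDedup]
    by_cases hm2 : PySem.Str.lower x ∈ ys.map PySem.Str.lower
    · by_cases hp : prev = some (PySem.Str.lower y)
      · rw [if_pos hp, if_pos hp, ih _ hsort' hm2]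
      · rw [if_neg hp, if_neg hp, ih _ hsort' hm2]
    · have hxy : PySem.Str.lower x = PySem.Str.lower y := by
        simp only [List.map_cons, List.mem_cons] at hmem
        tauto
      have hle' : ∀ z ∈ ys, PySem.Str.lower x ≤ PySem.Str.lower z := by
        intro z hz; rw [hxy]; exact hyle _ (List.mem_map_of_mem hz)
      by_cases hp : prev = some (PySem.Str.lower y)
      · rw [if_pos hp, if_pos hp, hp, ← hxy, pvDedup_insert_dup_head ys x hm2 hle']
      · rw [if_neg hp, if_neg hp, ← hxy, pvDedup_insert_dup_head ys x hm2 hle']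

-- L2: inserting x with a fresh lowercase commutes with dedup
lemma pvDedup_insert_new (s : List String) (x : String) (prev : Option String)
    (hprev : ∀ L, prev = some L → L < PySem.Str.lower x)
    (hmem : PySem.Str.lower x ∉ s.map PySem.Str.lower) :
    pvDedup prev (PySem.List.insertBy (fun a b => decide (PySem.Str.lower a < PySem.Str.lower b)) x s)
      = PySem.List.insertBy (fun a b => decide (PySem.Str.lower a < PySem.Str.lower b)) x (pvDedup prev s) := by
  induction s generalizing prev with
  | nil =>
    have hp : prev ≠ some (PySem.Str.lower x) := by
      intro he; exact absurd (hprev _ he) (lt_irrefl _)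
    simp [PySem.List.insertBy, pvDedup, hp]
  | cons y ys ih =>
    have hxy : PySem.Str.lower x ≠ PySem.Str.lower y := by
      intro he; exact hmem (by simp [he])
    by_cases hb : PySem.Str.lower x < PySem.Str.lower y
    · have hpx : prev ≠ some (PySem.Str.lower x) := by
        intro he; exact absurd (hprev _ he) (lt_irrefl _)
      have hpy : prev ≠ some (PySem.Str.lower y) := by
        intro he; exact absurd (hb.trans (hprev _ he)) (lt_irrefl _)
      simp only [PySem.List.insertBy, decide_eq_true_eq, if_pos hb, pvDedup,
        if_neg hpx, if_neg hpy]
      rw [if_neg (show ¬ some (PySem.Str.lower x) = some (PySem.Str.lower y) from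
        fun h => hxy (Option.some.inj h))]
    · have hyx : PySem.Str.lower y < PySem.Str.lower x :=
        lt_of_le_of_ne (not_lt.mp hb) (fun h => hxy h.symm)
      have hmem' : PySem.Str.lower x ∉ ys.map PySem.Str.lower := by
        intro hm; exact hmem (by simp [hm])
      simp only [PySem.List.insertBy, decide_eq_true_eq, if_neg hb, pvDedup]
      by_cases hp : prev = some (PySem.Str.lower y)
      · rw [if_pos hp, if_pos hp,
          ih prev (by intro L hL; rw [hp] at hL; rw [← Option.some.inj hL]; exact hyx) hmem']
      · rw [if_neg hp, if_neg hp,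
          ih (some (PySem.Str.lower y)) (by intro L hL; rw [← Option.some.inj hL]; exact hyx) hmem']
        simp [PySem.List.insertBy, hb]

-- main: adjacent dedup of the stable sort = stable sort of the first representatives
lemma pvMain (ns : List String) :
    pvDedup none (PySem.List.sorted ns (fun s => PySem.Str.lower s) false)
      = PySem.List.sorted (pvFirst [] ns) (fun s => PySem.Str.lower s) false := by
  induction ns using List.reverseRecOn with
  | nil => simp [PySem.List.sorted_eq_foldl_insertBy, pvDedup, pvFirst]
  | append_singleton ns x ih =>
    have hins : ∀ (l : List String),
        PySem.List.sorted (l ++ [x]) (fun s => PySem.Str.lower s) false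
          = PySem.List.insertBy (fun a b => decide (PySem.Str.lower a < PySem.Str.lower b)) x
              (PySem.List.sorted l (fun s => PySem.Str.lower s) false) := by
      intro l
      rw [PySem.List.sorted_eq_foldl_insertBy, PySem.List.sorted_eq_foldl_insertBy,
        List.foldl_append, List.foldl_cons, List.foldl_nil]
    rw [hins ns, pvFirst_append]
    by_cases hx : PySem.Str.lower x ∈ ns.map PySem.Str.lower
    · have hxs : PySem.Str.lower x ∈ (PySem.List.sorted ns (fun s => PySem.Str.lower s) false).map PySem.Str.lower := by
        rcases List.mem_map.mp hx with ⟨n, hn, he⟩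
        exact List.mem_map.mpr ⟨n, (PySem.List.mem_sorted ns _ false n).mpr hn, he⟩
      rw [pvDedup_insert_dup _ _ _ (PySem.List.sorted_map_key_pairwise ns _) hxs, ih,
        if_pos (Or.inr hx)]
    · have hxs : PySem.Str.lower x ∉ (PySem.List.sorted ns (fun s => PySem.Str.lower s) false).map PySem.Str.lower := by
        intro hm
        rcases List.mem_map.mp hm with ⟨n, hn, he⟩
        exact hx (he ▸ List.mem_map_of_mem ((PySem.List.mem_sorted ns _ false n).mp hn))
      rw [pvDedup_insert_new _ _ none (by simp) hxs, ih,
        if_neg (by simp [hx]), hins (pvFirst [] ns)]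

-- A's output = stable sort of the first representatives
lemma pvA_eq (ns : List String) :
    (PySem.List.sorted (ns.foldl pvDStep PySem.Dict.empty).keys (fun k => k) false).map
        (fun key => (ns.foldl pvDStep PySem.Dict.empty).getD key "")
      = PySem.List.sorted (pvFirst [] ns) (fun s => PySem.Str.lower s) false := by
  set d := ns.foldl pvDStep PySem.Dict.empty with hd
  set f := pvFirst [] ns with hf
  have hitems : d.items = f.map (fun n => (PySem.Str.lower n, n)) := by
    rw [hd, pvDict_items]
    simp [PySem.Dict.empty, hf]
  have hkeys : d.keys = f.map PySem.Str.lower := by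
    show d.items.map Prod.fst = _
    rw [hitems, List.map_map]
    rfl
  have hnodup : (f.map PySem.Str.lower).Nodup := (pvFirst_nodup ns []).1
  set g := PySem.List.sorted f (fun s => PySem.Str.lower s) false with hg
  have hperm : (g.map PySem.Str.lower).Perm d.keys := by
    rw [hkeys]
    exact (PySem.List.sorted_perm f _ false).map _
  have hpw : (g.map PySem.Str.lower).Pairwise (· < ·) := by
    have h1 : (g.map PySem.Str.lower).Pairwise (· ≤ ·) :=
      PySem.List.sorted_map_key_pairwise f _
    have h2 : (g.map PySem.Str.lower).Nodup :=
      hperm.symm.nodup (by rw [hkeys]; exact hnodup)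
    exact (h1.and h2).imp (fun h => lt_of_le_of_ne h.1 h.2)
  rw [PySem.List.sorted_eq_of_perm_of_pairwise_lt d.keys (g.map PySem.Str.lower) _ hperm hpw,
    List.map_map]
  conv_rhs => rw [← List.map_id g]
  apply List.map_congr_left
  intro n hn
  have hnf : n ∈ f := (PySem.List.mem_sorted f _ false n).mp hn
  have hitem : (PySem.Str.lower n, n) ∈ d.items := by
    rw [hitems]; exact List.mem_map_of_mem hnf
  exact PySem.Dict.getD_of_mem_items d hitem (hkeys ▸ hnodup) ""

-- ===== VERDICT (by name: the statement is the Claim_ definition above) =====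
theorem parse_ollama_model_names_spec : Claim_equal_parse_ollama_model_names := by
  intro payload _
  unfold Spec_parse_ollama_model_names parse_ollama_model_names parse_ollama_model_names_alt
  simp only [pvNames_fold, pvDict_fold, List.nil_append]
  rw [pvDedup_fold, List.nil_append, pvMain]
  exact pvA_eq _
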